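-- pv_equiv track=rewrite | github.com/CylonicRaider/Instant | script/logdump.py | sort_threads
-- ===== SOURCE A (Python) =====
-- def sort_threads(msglist):
--     def dump(k):
--         if k in index:
--             ret.append(index[k])
--         for c in sorted(children.get(k, ())):
--             dump(c)
--     # Put messages into indexes
--     index, children = {}, {}
--     for m in msglist:
--         index[m['id']] = m
--         p = m.get('parent')
--         children.setdefault(p, []).append(m['id'])
--     # Compute set of roots
--     roots = set(children)
--     roots.difference_update(index)
--     roots.update(children.get(None, ()))
--     roots.discard(None)
--     # Extract messages again
--     ret = []
--     for k in sorted(roots): dump(k)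
--     return ret
-- ===== SOURCE B (Python) =====
-- def sort_threads(msglist):
--     # Put messages into indexes (same preprocessing as before)
--     index, children = {}, {}
--     for m in msglist:
--         index[m['id']] = m
--         p = m.get('parent')
--         children.setdefault(p, []).append(m['id'])
--     # Compute set of roots
--     roots = set(children)
--     roots.difference_update(index)
--     roots.update(children.get(None, ()))
--     roots.discard(None)
--     # Iterative pre-order DFS with an explicit stack (top = end of list):
--     # pushing keys in reverse sorted order makes the LIFO pop them ascending.
--     ret = []
--     stack = sorted(roots, reverse=True)
--     while stack:
--         k = stack.pop()
--         if k in index: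
--             ret.append(index[k])
--         stack.extend(sorted(children.get(k, ()), reverse=True))
--     return ret
-- ===== Notes on version B (the rewrite author's own statement) =====
-- stated objective: alternative
-- what changed: The recursive dump() is replaced by an iterative pre-order DFS over an explicit stack onto which sorted children are pushed in reverse, so the same ordering is produced without recursion; the index/children/roots preprocessing is unchanged.
import Mathlib
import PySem

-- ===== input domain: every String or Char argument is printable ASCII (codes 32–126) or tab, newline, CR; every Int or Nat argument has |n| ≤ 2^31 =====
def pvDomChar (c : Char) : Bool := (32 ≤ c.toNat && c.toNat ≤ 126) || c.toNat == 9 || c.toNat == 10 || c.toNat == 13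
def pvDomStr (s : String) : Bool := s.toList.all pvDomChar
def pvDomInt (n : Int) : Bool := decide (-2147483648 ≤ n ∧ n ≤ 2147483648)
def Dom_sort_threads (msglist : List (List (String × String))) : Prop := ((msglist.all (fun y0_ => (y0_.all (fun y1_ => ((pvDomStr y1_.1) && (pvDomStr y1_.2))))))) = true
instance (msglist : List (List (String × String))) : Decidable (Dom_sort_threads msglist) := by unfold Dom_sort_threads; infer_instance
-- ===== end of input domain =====

-- B changes only the extraction phase: the recursive dump() becomes an iterative explicit-stack
-- pre-order DFS (children pushed in reverse sorted order); preprocessing is identical.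
-- Both ports totalize the traversal with the same depth fuel (msglist.length + 2), which never
-- truncates on Pre_ inputs (with one parent per id, every chain reachable from a root is
-- shorter than that).

-- ===== PORT A =====
-- m['id'] (Pre_ guarantees the key is present) and m.get('parent')
def pvIdOf (m : List (String × String)) : String := (PySem.Dict.ofList m).getD "id" ""
def pvParOf (m : List (String × String)) : Option String := (PySem.Dict.ofList m).get? "parent"

-- for m in msglist: index[m['id']] = m; children.setdefault(m.get('parent'), []).append(m['id'])
def pvBuild (msglist : List (List (String × String))) :
    PySem.Dict String (List (String × String)) × PySem.Dict (Option String) (List String) :=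
  msglist.foldl
    (fun st m => (st.1.insert (pvIdOf m) m, st.2.modify (pvParOf m) [] (· ++ [pvIdOf m])))
    (PySem.Dict.empty, PySem.Dict.empty)

-- roots = set(children); roots.difference_update(index); roots.update(children.get(None, ()));
-- roots.discard(None).  The final filterMap only converts the element type Option String → String
-- (after the discard no None is left).
def pvRoots (index : PySem.Dict String (List (String × String)))
    (children : PySem.Dict (Option String) (List String)) : List String :=
  let r0 : PySem.Set (Option String) := PySem.Set.ofList children.keys
  let r1 := PySem.Set.diff r0 (index.keys.map some)
  let r2 := PySem.Set.update r1 ((children.getD none []).map some)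
  let r3 := PySem.Set.discard r2 none
  r3.filterMap (fun x => x)

-- def dump(k): if k in index: ret.append(index[k]); for c in sorted(children.get(k, ())): dump(c)
-- (fuel d totalizes the recursion; ret is threaded as an accumulator)
def pvDumpA (index : PySem.Dict String (List (String × String)))
    (children : PySem.Dict (Option String) (List String)) :
    Nat → String → List (List (String × String)) → List (List (String × String))
  | 0, _, ret => ret
  | d + 1, k, ret =>
      (PySem.List.sorted (children.getD (some k) []) (fun x => x) false).foldl
        (fun r c => pvDumpA index children d c r)
        (if index.contains k then ret ++ [index.getD k []] else ret)

def sort_threads (msglist : List (List (String × String))) : List (List (String × String)) :=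
  -- ret = []; for k in sorted(roots): dump(k)
  (PySem.List.sorted (pvRoots (pvBuild msglist).1 (pvBuild msglist).2) (fun x => x) false).foldl
    (fun ret k => pvDumpA (pvBuild msglist).1 (pvBuild msglist).2 (msglist.length + 2) k ret) []

-- ===== PORT B =====
-- bound used by the stack loop's termination measure: every children[...] list
-- built by pvBuild has at most msglist.length entries (proved in pvChildren_len_le below)
def pvChildrenFold (msglist : List (List (String × String))) : PySem.Dict (Option String) (List String) :=
  msglist.foldl (fun d m => d.modify (pvParOf m) [] (· ++ [pvIdOf m])) PySem.Dict.empty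

theorem pvBuild_snd (msglist : List (List (String × String))) :
    (pvBuild msglist).2 = pvChildrenFold msglist := by
  unfold pvBuild pvChildrenFold
  suffices h : ∀ (a : PySem.Dict String (List (String × String)))
      (b : PySem.Dict (Option String) (List String)),
      (msglist.foldl
        (fun st m => (st.1.insert (pvIdOf m) m, st.2.modify (pvParOf m) [] (· ++ [pvIdOf m])))
        (a, b)).2
      = msglist.foldl (fun d m => d.modify (pvParOf m) [] (· ++ [pvIdOf m])) b by
    exact h _ _
  induction msglist with
  | nil => intro a b; rfl
  | cons m ms ih => intro a b; simpa using ih _ _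

theorem pvChildren_len_le (msglist : List (List (String × String))) (k : Option String) :
    (((pvBuild msglist).2).getD k []).length ≤ msglist.length := by
  rw [pvBuild_snd]
  unfold pvChildrenFold
  rw [show msglist.foldl (fun d m => d.modify (pvParOf m) [] (· ++ [pvIdOf m])) PySem.Dict.empty
      = (msglist.map (fun m => (pvParOf m, pvIdOf m))).foldl
          (fun d p => d.modify p.1 [] (· ++ [p.2])) PySem.Dict.empty by
    rw [List.foldl_map]]
  rw [PySem.Dict.getD_foldl_modify_append]
  simp only [PySem.Dict.getD_empty, List.nil_append, List.length_map]
  calc ((msglist.map fun m => (pvParOf m, pvIdOf m)).filter (fun p => p.1 == k)).length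
      ≤ (msglist.map fun m => (pvParOf m, pvIdOf m)).length := List.length_filter_le _ _
    _ = msglist.length := List.length_map ..

-- sum of a constant map, used by pvLoopB's termination measure
theorem pv_sum_map_const {α : Type} (l : List α) (c : Nat) : (l.map (fun _ => c)).sum = l.length * c := by
  induction l with
  | nil => simp
  | cons x xs ih => simp [Nat.succ_mul]; omega

-- while stack: k = stack.pop(); if k in index: ret.append(index[k]);
--              stack.extend(sorted(children.get(k, ()), reverse=True))
-- The Lean stack is the REVERSE of the Python list (head = Python's end = top of stack),
-- so Python's stack.extend(xs) is 'xs.reverse ++ stack' here.  Each key carries the same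
-- depth fuel as port A's dump; hW only feeds the termination measure.
def pvLoopB (W : Nat) (index : PySem.Dict String (List (String × String)))
    (children : PySem.Dict (Option String) (List String))
    (hW : ∀ k, (children.getD k []).length ≤ W) :
    List (String × Nat) → List (List (String × String)) → List (List (String × String))
  | [], ret => ret
  | (_, 0) :: st, ret => pvLoopB W index children hW st ret
  | (k, d + 1) :: st, ret =>
      pvLoopB W index children hW
        (((PySem.List.sorted (children.getD (some k) []) (fun x => x) true).reverse.map
            (fun c => (c, d))) ++ st)
        (if index.contains k then ret ++ [index.getD k []] else ret)
  termination_by st _ => (st.map (fun p => (W + 1) ^ p.2)).sum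
  decreasing_by
  · simp
  · simp only [List.map_append, List.sum_append, List.map_map, List.map_cons, List.sum_cons]
    have h1 : (List.map ((fun p => (W + 1) ^ p.2) ∘ fun c => (c, d))
        (PySem.List.sorted (children.getD (some k) []) (fun x => x) true).reverse).sum
        = (children.getD (some k) []).length * (W + 1) ^ d := by
      rw [show ((fun (p : String × Nat) => (W + 1) ^ p.2) ∘ fun c => (c, d))
          = (fun (_ : String) => (W + 1) ^ d) from rfl]
      rw [pv_sum_map_const]
      simp [PySem.List.length_sorted]
    rw [h1]
    have h2 : (children.getD (some k) []).length * (W + 1) ^ d ≤ W * (W + 1) ^ d :=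
      Nat.mul_le_mul_right _ (hW (some k))
    have h3 : 0 < (W + 1) ^ d := by positivity
    have h4 : W * (W + 1) ^ d < (W + 1) ^ (d + 1) := by
      rw [pow_succ]; nlinarith
    calc (children.getD (some k) []).length * (W + 1) ^ d
          + (List.map (fun p => (W + 1) ^ p.2) st).sum
        ≤ W * (W + 1) ^ d + (List.map (fun p => (W + 1) ^ p.2) st).sum :=
          Nat.add_le_add_right h2 _
      _ < (W + 1) ^ (d + 1) + (List.map (fun p => (W + 1) ^ p.2) st).sum :=
          Nat.add_lt_add_right h4 _

def sort_threads_alt (msglist : List (List (String × String))) : List (List (String × String)) :=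
  -- ret = []; stack = sorted(roots, reverse=True); while stack: …
  pvLoopB msglist.length (pvBuild msglist).1 (pvBuild msglist).2 (pvChildren_len_le msglist)
    ((PySem.List.sorted (pvRoots (pvBuild msglist).1 (pvBuild msglist).2) (fun x => x) true).reverse.map
      (fun k => (k, msglist.length + 2)))
    []

-- ===== PRECONDITION & SPEC =====
-- Pre_ excludes (a) messages without an 'id' key, on which A raises KeyError, and
-- (b) lists where one id occurs with two different parent values: there A's dict-overwritten
-- duplicates can give a node two parents and form a parent cycle reachable from a root, on
-- which A recurses forever (RecursionError).
def Pre_sort_threads (msglist : List (List (String × String))) : Prop :=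
  (∀ m ∈ msglist, (PySem.Dict.ofList m).contains "id" = true) ∧
  (∀ m1 ∈ msglist, ∀ m2 ∈ msglist, pvIdOf m1 = pvIdOf m2 → pvParOf m1 = pvParOf m2)
instance (msglist : List (List (String × String))) : Decidable (Pre_sort_threads msglist) := by
  unfold Pre_sort_threads; infer_instance

def pvWitness_sort_threads : (List (List (String × String))) :=
  [[("id", "b"), ("parent", "a")], [("id", "a")], [("id", "c"), ("parent", "a")]]

def Spec_sort_threads (msglist : List (List (String × String))) (out : List (List (String × String))) : Prop := out = sort_threads_alt msglist
instance (msglist : List (List (String × String))) (out : List (List (String × String))) : Decidable (Spec_sort_threads msglist out) := by unfold Spec_sort_threads; infer_instance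

-- ===== CLAIM (what is proved, stated in full; the proofs are below) =====
def Claim_equal_sort_threads : Prop := ∀ (msglist : List (List (String × String))), Dom_sort_threads msglist → Pre_sort_threads msglist → Spec_sort_threads msglist (sort_threads msglist)

-- ===== LEMMAS AND PROOFS =====

-- reversing Python's reverse=True sort of strings gives the ascending sort
theorem pv_sorted_true_reverse (cs : List String) :
    (PySem.List.sorted cs (fun x => x) true).reverse = PySem.List.sorted cs (fun x => x) false := by
  refine PySem.List.sorted_id_eq_of_perm_of_pairwise cs
    ((PySem.List.sorted cs (fun x => x) true).reverse) ?_ ?_ |>.symm ▸ rfl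
  · exact (List.reverse_perm _).trans (PySem.List.sorted_perm _ _ _)
  · rw [List.pairwise_reverse]
    exact PySem.List.sorted_pairwise_rev cs (fun x => x)

-- bridge: the stack loop over keys ks (each with fuel d) is the fold of A's fueled dump
theorem pv_loop_eq_dump (W : Nat) (index : PySem.Dict String (List (String × String)))
    (children : PySem.Dict (Option String) (List String))
    (hW : ∀ k, (children.getD k []).length ≤ W) :
    ∀ (d : Nat) (ks : List String) (st : List (String × Nat)) (ret : List (List (String × String))),
      pvLoopB W index children hW (ks.map (fun k => (k, d)) ++ st) ret
      = pvLoopB W index children hW st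
          (ks.foldl (fun r k => pvDumpA index children d k r) ret) := by
  intro d
  induction d with
  | zero =>
      intro ks
      induction ks with
      | nil => intro st ret; rfl
      | cons k ks ih =>
          intro st ret
          simp only [List.map_cons, List.cons_append]
          rw [show pvLoopB W index children hW ((k, 0) :: (ks.map (fun k => (k, 0)) ++ st)) ret
              = pvLoopB W index children hW (ks.map (fun k => (k, 0)) ++ st) ret from by
            simp only [pvLoopB]]
          rw [ih st ret]
          rfl
  | succ d ihd =>
      intro ks
      induction ks with
      | nil => intro st ret; rfl
      | cons k ks ih =>
          intro st ret
          simp only [List.map_cons, List.cons_append]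
          rw [show pvLoopB W index children hW
                ((k, d + 1) :: (ks.map (fun k => (k, d + 1)) ++ st)) ret
              = pvLoopB W index children hW
                  (((PySem.List.sorted (children.getD (some k) []) (fun x => x) true).reverse.map
                      (fun c => (c, d))) ++ (ks.map (fun k => (k, d + 1)) ++ st))
                  (if index.contains k then ret ++ [index.getD k []] else ret) from by
            simp only [pvLoopB]]
          rw [pv_sorted_true_reverse]
          rw [ihd _ _ _]
          rw [show (PySem.List.sorted (children.getD (some k) []) (fun x => x) false).foldl
                (fun r c => pvDumpA index children d c r)
                (if index.contains k then ret ++ [index.getD k []] else ret)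
              = pvDumpA index children (d + 1) k ret from rfl]
          exact ih _ _

-- ===== VERDICT (by name: the statement is the Claim_ definition above) =====
theorem sort_threads_spec : Claim_equal_sort_threads := by
  intro msglist _ _
  unfold Spec_sort_threads sort_threads sort_threads_alt
  rw [pv_sorted_true_reverse]
  have h := pv_loop_eq_dump msglist.length (pvBuild msglist).1 (pvBuild msglist).2
    (pvChildren_len_le msglist) (msglist.length + 2)
    (PySem.List.sorted (pvRoots (pvBuild msglist).1 (pvBuild msglist).2) (fun x => x) false)
    [] []
  rw [List.append_nil] at h
  rw [h]
  simp only [pvLoopB]
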